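-- pv_equiv track=rewrite | github.com/papagina/Auto_Conditioned_RNN_motion | code/pytorch_test_synthesize_motion.py | get_dance_len_lst
-- ===== SOURCE A (Python) =====
-- def get_dance_len_lst(dances):
--     len_lst=[]
--     for dance in dances:
--         length=len(dance)/100
--         length=10
--         if(length<1):
--             length=1
--         len_lst=len_lst+[length]
--
--     index_lst=[]
--     index=0
--     for length in len_lst:
--         for i in range(length):
--             index_lst=index_lst+[index]
--         index=index+1
--     return index_lst
-- ===== SOURCE B (Python) =====
-- def get_dance_len_lst(dances):
--     # each dance index is repeated exactly 10 times, so emit k // 10 in one flat pass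
--     return [k // 10 for k in range(10 * len(dances))]
-- ===== Notes on version B (the rewrite author's own statement) =====
-- stated objective: simpler
-- what changed: Replaced the intermediate length table (always 10 per dance) and the nested append loops with a single flat comprehension over range(10*len(dances)) emitting k//10.
import Mathlib
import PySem

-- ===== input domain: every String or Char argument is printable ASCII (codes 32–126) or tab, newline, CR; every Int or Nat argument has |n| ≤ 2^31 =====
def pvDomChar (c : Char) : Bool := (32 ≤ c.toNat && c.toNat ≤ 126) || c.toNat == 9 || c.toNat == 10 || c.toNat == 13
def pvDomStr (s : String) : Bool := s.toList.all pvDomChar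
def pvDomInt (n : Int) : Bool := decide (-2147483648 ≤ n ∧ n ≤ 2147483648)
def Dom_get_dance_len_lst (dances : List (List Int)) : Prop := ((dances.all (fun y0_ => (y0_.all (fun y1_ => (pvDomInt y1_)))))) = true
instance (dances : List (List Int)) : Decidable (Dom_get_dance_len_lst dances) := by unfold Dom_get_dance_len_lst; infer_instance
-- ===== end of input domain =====

-- ===== PORT A =====
-- 'length=len(dance)/100' is a dead float assignment, immediately overwritten by 'length=10'; omitted.
def get_dance_len_lst (dances : List (List Int)) : List Int :=
  let len_lst : List Int := dances.foldl (fun acc _dance =>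
    let length : Int := 10
    let length := if length < 1 then 1 else length
    acc ++ [length]) []
  let p : List Int × Int := len_lst.foldl (fun (p : List Int × Int) length =>
    ((PySem.List.pyRange 0 length 1).foldl (fun il _i => il ++ [p.2]) p.1, p.2 + 1)) ([], 0)
  p.1

-- ===== PORT B =====
def get_dance_len_lst_alt (dances : List (List Int)) : List Int :=
  (PySem.List.pyRange 0 (10 * (dances.length : Int)) 1).map (fun k => PySem.Int.floordiv k 10)

-- ===== PRECONDITION & SPEC =====
def Spec_get_dance_len_lst (dances : List (List Int)) (out : List Int) : Prop := out = get_dance_len_lst_alt dances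
instance (dances : List (List Int)) (out : List Int) : Decidable (Spec_get_dance_len_lst dances out) := by unfold Spec_get_dance_len_lst; infer_instance

-- ===== CLAIM (what is proved, stated in full; the proofs are below) =====
def Claim_equal_get_dance_len_lst : Prop := ∀ (dances : List (List Int)), Dom_get_dance_len_lst dances → Spec_get_dance_len_lst dances (get_dance_len_lst dances)

-- ===== LEMMAS AND PROOFS =====

-- ===== VERDICT (by name: the statement is the Claim_ definition above) =====
-- blocks of indices: blocksFrom i n = [i]*10 ++ [i+1]*10 ++ … (n blocks)
def blocksFrom (i : Int) : Nat → List Int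
  | 0 => []
  | n+1 => List.replicate 10 i ++ blocksFrom (i+1) n

lemma lenA_gen (dances : List (List Int)) (acc : List Int) :
    dances.foldl (fun acc (_dance : List Int) =>
      let length : Int := 10
      let length := if length < 1 then 1 else length
      acc ++ [length]) acc = acc ++ List.replicate dances.length (10 : Int) := by
  induction dances generalizing acc with
  | nil => simp
  | cons d tl ih =>
    simp only [List.foldl_cons, List.length_cons, ih]
    norm_num [List.replicate_succ]

lemma lenA (dances : List (List Int)) :
    dances.foldl (fun acc (_dance : List Int) =>
      let length : Int := 10
      let length := if length < 1 then 1 else length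
      acc ++ [length]) [] = List.replicate dances.length (10 : Int) := by
  exact (lenA_gen dances []).trans (List.nil_append _)

lemma innerA (acc : List Int) (idx : Int) :
    (PySem.List.pyRange 0 10 1).foldl (fun il _i => il ++ [idx]) acc
      = acc ++ List.replicate 10 idx := by
  have h : PySem.List.pyRange 0 10 1 = [0,1,2,3,4,5,6,7,8,9] := by decide
  rw [h]
  simp [List.foldl, List.replicate]

lemma outerA (n : Nat) (acc : List Int) (idx : Int) :
    (List.replicate n (10 : Int)).foldl (fun (p : List Int × Int) length =>
      ((PySem.List.pyRange 0 length 1).foldl (fun il _i => il ++ [p.2]) p.1, p.2 + 1)) (acc, idx)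
      = (acc ++ blocksFrom idx n, idx + n) := by
  induction n generalizing acc idx with
  | zero => simp [blocksFrom]
  | succ m ih =>
    rw [List.replicate_succ, List.foldl_cons]
    simp only [innerA, ih, blocksFrom, Prod.mk.injEq]
    refine ⟨by simp [List.append_assoc], by push_cast; ring⟩

lemma blocksFrom_snoc (i : Int) (n : Nat) :
    blocksFrom i (n+1) = blocksFrom i n ++ List.replicate 10 (i + n) := by
  induction n generalizing i with
  | zero => simp [blocksFrom]
  | succ m ih =>
    show List.replicate 10 i ++ blocksFrom (i+1) (m+1) = _
    rw [ih]
    simp only [blocksFrom, List.append_assoc]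
    congr 3
    push_cast; ring

lemma altB (n : Nat) :
    (PySem.List.pyRange 0 (10 * (n : Int)) 1).map (fun k => PySem.Int.floordiv k 10)
      = blocksFrom 0 n := by
  induction n with
  | zero => simp [blocksFrom, PySem.List.pyRange_one_eq_nil]
  | succ m ih =>
    have hsplit := PySem.List.pyRange_one_append 0 (10 * (m : Int)) (10 * ((m+1 : Nat) : Int))
      (by positivity) (by push_cast; omega)
    rw [hsplit, List.map_append, ih, blocksFrom_snoc]
    congr 1
    have h10 : ((10 * (((m+1 : Nat)) : Int) - 10 * (m : Int))).toNat = 10 := by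
      push_cast; omega
    rw [PySem.List.pyRange_one, h10]
    have hdiv : ∀ k : Int, 0 ≤ k → k < 10 → PySem.Int.floordiv (10 * (m:Int) + k) 10 = m := by
      intro k h1 h2
      rw [PySem.Int.floordiv_eq_iff_of_pos (by norm_num)]
      omega
    simp only [List.range_succ, List.range_zero, List.map_append, List.map_cons, List.map_nil,
      List.nil_append]
    norm_num [hdiv, List.replicate]
    omega

theorem get_dance_len_lst_spec : Claim_equal_get_dance_len_lst := by
  intro dances _
  unfold Spec_get_dance_len_lst get_dance_len_lst get_dance_len_lst_alt
  simp only [lenA, outerA, altB, List.nil_append]
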